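-- pv_equiv track=rewrite | github.com/kukaiN/Discrete_math | visualize_convex_sets.py | Max_Min_of_tuple
-- ===== SOURCE A (Python) =====
-- def Max_Min_of_tuple(points):
--     max_value = points[0][0]
--     min_value = points[0][0]
--     for point in points:
--         for coordinate_value in point:
--             if coordinate_value > max_value:
--                 max_value = coordinate_value
--             if coordinate_value < min_value:
--                 min_value = coordinate_value
--     return (max_value, min_value)
-- ===== SOURCE B (Python) =====
-- def Max_Min_of_tuple(points):
--     flat = [c for p in points for c in p]
--     return (max(flat), min(flat))
-- ===== Notes on version B (the rewrite author's own statement) =====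
-- stated objective: idiomatic
-- what changed: Replaces the seeded nested loop with explicit running max/min state by flattening all coordinates once and calling the builtin max/min.
-- crash fix: A raises IndexError whenever points is empty or its first tuple is empty; B returns the true (max, min) of all coordinates as long as any tuple is nonempty, raising ValueError only when there are no coordinates at all. — e.g. on Max_Min_of_tuple([[], [1, 2]]): A raises IndexError, B returns (2, 1)
import Mathlib
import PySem

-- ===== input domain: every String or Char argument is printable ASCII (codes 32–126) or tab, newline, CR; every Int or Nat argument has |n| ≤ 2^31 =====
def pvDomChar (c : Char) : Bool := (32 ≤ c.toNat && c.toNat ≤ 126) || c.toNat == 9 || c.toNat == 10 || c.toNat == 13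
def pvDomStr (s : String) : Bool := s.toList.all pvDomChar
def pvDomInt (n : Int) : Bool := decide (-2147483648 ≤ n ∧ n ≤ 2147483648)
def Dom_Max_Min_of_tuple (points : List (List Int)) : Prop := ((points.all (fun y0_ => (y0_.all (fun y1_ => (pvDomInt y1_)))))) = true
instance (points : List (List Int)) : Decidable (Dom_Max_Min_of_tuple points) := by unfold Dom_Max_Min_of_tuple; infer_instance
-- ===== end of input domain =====

-- B flattens all coordinates once and takes builtin max/min instead of A's nested loop with running max/min state (idiomatic).


-- ===== PORT A =====
-- points[0][0] seeds both accumulators; outside Pre_ (where Python raises IndexError) the default 0 is used.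
def Max_Min_of_tuple (points : List (List Int)) : Int × Int :=
  let seed : Int := ((PySem.List.pyGet? points 0).getD []).headD 0
  points.foldl
    (fun (mm : Int × Int) point =>
      point.foldl
        (fun (mm : Int × Int) c =>
          (if c > mm.1 then c else mm.1, if c < mm.2 then c else mm.2)) mm)
    (seed, seed)

-- ===== PORT B =====
-- flat = [c for p in points for c in p]; (max(flat), min(flat)); getD 0 stands for the ValueError case outside Pre_.
def Max_Min_of_tuple_alt (points : List (List Int)) : Int × Int :=
  let flat := points.flatMap (fun p => p)
  ((PySem.List.max? flat (fun x => x)).getD 0, (PySem.List.min? flat (fun x => x)).getD 0)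

-- ===== PRECONDITION & SPEC =====
-- A raises IndexError exactly when points is empty or its first tuple is empty; those inputs are excluded.
def Pre_Max_Min_of_tuple (points : List (List Int)) : Prop :=
  points ≠ [] ∧ points.headD [] ≠ []
instance (points : List (List Int)) : Decidable (Pre_Max_Min_of_tuple points) := by
  unfold Pre_Max_Min_of_tuple; infer_instance
def pvWitness_Max_Min_of_tuple : List (List Int) := [[3, -1], [2]]

-- A raises IndexError whenever the first tuple is empty even though other tuples carry coordinates; B returns the (max, min) of all coordinates there.
def Raises_Max_Min_of_tuple (points : List (List Int)) : Prop :=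
  (points = [] ∨ points.headD [] = []) ∧ points.any (fun p => !p.isEmpty) = true
instance (points : List (List Int)) : Decidable (Raises_Max_Min_of_tuple points) := by
  unfold Raises_Max_Min_of_tuple; infer_instance
def pvRaiseWitness_Max_Min_of_tuple : List (List Int) := [[], [1, 2]]
def pvRaiseWitnessOut_Max_Min_of_tuple : Int × Int := (2, 1)

def Spec_Max_Min_of_tuple (points : List (List Int)) (out : Int × Int) : Prop :=
  out = Max_Min_of_tuple_alt points
instance (points : List (List Int)) (out : Int × Int) : Decidable (Spec_Max_Min_of_tuple points out) := by
  unfold Spec_Max_Min_of_tuple; infer_instance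

-- ===== CLAIM =====
def Claim_equal_Max_Min_of_tuple : Prop := ∀ (points : List (List Int)), Dom_Max_Min_of_tuple points → Pre_Max_Min_of_tuple points → Spec_Max_Min_of_tuple points (Max_Min_of_tuple points)
def Claim_raises_Max_Min_of_tuple : Prop := (∀ (points : List (List Int)), Dom_Max_Min_of_tuple points → Raises_Max_Min_of_tuple points → ¬ Pre_Max_Min_of_tuple points) ∧ (Dom_Max_Min_of_tuple (pvRaiseWitness_Max_Min_of_tuple) ∧ Raises_Max_Min_of_tuple (pvRaiseWitness_Max_Min_of_tuple) ∧ Max_Min_of_tuple_alt (pvRaiseWitness_Max_Min_of_tuple) = pvRaiseWitnessOut_Max_Min_of_tuple)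

-- ===== LEMMAS AND PROOFS =====
-- A's inner loop over one tuple splits into a running-max fold and a running-min fold.
theorem inner_fold (point : List Int) (a b : Int) :
    point.foldl
      (fun (mm : Int × Int) c =>
        (if c > mm.1 then c else mm.1, if c < mm.2 then c else mm.2)) (a, b)
    = (point.foldl max a, point.foldl min b) := by
  induction point generalizing a b with
  | nil => rfl
  | cons c t ih =>
    simp only [List.foldl]
    rw [ih]
    congr 1
    · rcases lt_or_ge a c with h | h
      · simp [max_eq_right h.le, h]
      · simp [max_eq_left h, not_lt.mpr h]
    · rcases lt_or_ge c b with h | h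
      · simp [min_eq_right h.le, h]
      · simp [min_eq_left h, not_lt.mpr h]

-- A's outer loop equals folding max/min over the flattened coordinate list.
theorem outer_fold (points : List (List Int)) (a b : Int) :
    points.foldl
      (fun (mm : Int × Int) point =>
        point.foldl
          (fun (mm : Int × Int) c =>
            (if c > mm.1 then c else mm.1, if c < mm.2 then c else mm.2)) mm) (a, b)
    = ((points.flatMap (fun p => p)).foldl max a, (points.flatMap (fun p => p)).foldl min b) := by
  induction points generalizing a b with
  | nil => rfl
  | cons p t ih =>
    simp only [List.foldl, List.flatMap_cons, List.foldl_append]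
    rw [inner_fold, ih]

-- ===== VERDICT =====
theorem Max_Min_of_tuple_spec : Claim_equal_Max_Min_of_tuple := by
  intro points _ hpre
  obtain ⟨hne, hhd⟩ := hpre
  unfold Spec_Max_Min_of_tuple Max_Min_of_tuple Max_Min_of_tuple_alt
  rcases points with _ | ⟨p, t⟩
  · exact absurd rfl hne
  rcases p with _ | ⟨c, cs⟩
  · exact absurd rfl hhd
  simp only [outer_fold]
  have hflat : ((c :: cs) :: t).flatMap (fun p => p) = c :: (cs ++ t.flatMap (fun p => p)) := by
    simp [List.flatMap_cons]
  rw [hflat]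
  rw [PySem.List.max?_id_cons, PySem.List.min?_id_cons]
  simp only [PySem.List.pyGet?, PySem.List.pyIdx?]
  simp [List.foldl, List.foldl_append]

def Max_Min_of_tuple_raises : Claim_raises_Max_Min_of_tuple := by
  unfold Claim_raises_Max_Min_of_tuple
  refine ⟨?_, by decide⟩
  intro points _ hr hpre
  rcases hr.1 with h | h
  · exact hpre.1 h
  · exact hpre.2 h
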